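-- pv_equiv track=rewrite | github.com/CodeMaster7000/Advent-of-Code-2025 | Day9/main.py | rectangle_is_valid
-- ===== SOURCE A (Python) =====
-- def rectangle_is_valid(p1, p2, filled):
--     x1, y1 = p1
--     x2, y2 = p2
--     xmin, xmax = sorted((x1, x2))
--     ymin, ymax = sorted((y1, y2))
--     for x in range(xmin, xmax + 1):
--         for y in range(ymin, ymax + 1):
--             if (x, y) not in filled:
--                 return False
--     return True
-- ===== SOURCE B (Python) =====
-- def rectangle_is_valid(p1, p2, filled):
--     x1, y1 = p1
--     x2, y2 = p2
--     xmin, xmax = (x1, x2) if x1 <= x2 else (x2, x1)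
--     ymin, ymax = (y1, y2) if y1 <= y2 else (y2, y1)
--     area = (xmax - xmin + 1) * (ymax - ymin + 1)
--     inside = {p for p in filled if xmin <= p[0] <= xmax and ymin <= p[1] <= ymax}
--     return len(inside) == area
-- ===== Notes on version B (the rewrite author's own statement) =====
-- stated objective: faster
-- what changed: Instead of scanning every cell of the rectangle and testing membership in filled, B computes the rectangle area and counts the distinct filled points lying inside the bounds in one pass over filled; the count equals the area iff every cell is covered.
import Mathlib
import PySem

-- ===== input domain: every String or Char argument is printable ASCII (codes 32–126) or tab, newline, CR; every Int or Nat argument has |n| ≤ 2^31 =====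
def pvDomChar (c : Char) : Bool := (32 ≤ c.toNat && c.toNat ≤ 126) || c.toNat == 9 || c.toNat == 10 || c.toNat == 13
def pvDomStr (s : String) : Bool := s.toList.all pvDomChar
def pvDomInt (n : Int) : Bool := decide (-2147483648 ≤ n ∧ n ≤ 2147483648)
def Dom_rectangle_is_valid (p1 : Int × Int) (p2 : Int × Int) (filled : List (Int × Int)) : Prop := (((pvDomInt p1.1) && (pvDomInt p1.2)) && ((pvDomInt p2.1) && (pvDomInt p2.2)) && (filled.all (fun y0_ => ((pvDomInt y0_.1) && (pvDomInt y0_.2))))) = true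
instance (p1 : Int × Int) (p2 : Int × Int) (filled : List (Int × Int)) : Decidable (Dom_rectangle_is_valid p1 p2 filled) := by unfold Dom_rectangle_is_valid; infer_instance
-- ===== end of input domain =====

-- B replaces A's cell-by-cell scan of the rectangle with one pass over `filled`:
-- it counts the distinct filled points inside the bounds and compares with the area.

-- ===== PORT A =====
-- inner 'for y in range(ymin, ymax + 1)' with early 'return False'; range is lazy, so the
-- port iterates by counter (y up to ymax) exactly as the Python loop does
def pvAInner (x y ymax : Int) (filled : List (Int × Int)) : Bool :=
  if y ≤ ymax then
    if (x, y) ∈ filled then pvAInner x (y + 1) ymax filled else false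
  else true
termination_by (ymax + 1 - y).toNat
decreasing_by omega

-- outer 'for x in range(xmin, xmax + 1)' with early 'return False'
def pvAOuter (x xmax ymin ymax : Int) (filled : List (Int × Int)) : Bool :=
  if x ≤ xmax then
    if pvAInner x ymin ymax filled then pvAOuter (x + 1) xmax ymin ymax filled else false
  else true
termination_by (xmax + 1 - x).toNat
decreasing_by omega

def rectangle_is_valid (p1 : Int × Int) (p2 : Int × Int) (filled : List (Int × Int)) : Bool :=
  let xmin := min p1.1 p2.1
  let xmax := max p1.1 p2.1
  let ymin := min p1.2 p2.2
  let ymax := max p1.2 p2.2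
  pvAOuter xmin xmax ymin ymax filled

-- ===== PORT B =====
def rectangle_is_valid_alt (p1 : Int × Int) (p2 : Int × Int) (filled : List (Int × Int)) : Bool :=
  let xmin := if p1.1 ≤ p2.1 then p1.1 else p2.1
  let xmax := if p1.1 ≤ p2.1 then p2.1 else p1.1
  let ymin := if p1.2 ≤ p2.2 then p1.2 else p2.2
  let ymax := if p1.2 ≤ p2.2 then p2.2 else p1.2
  let area := (xmax - xmin + 1) * (ymax - ymin + 1)
  let inside := PySem.Set.ofList (filled.filter
    (fun p => decide (xmin ≤ p.1 ∧ p.1 ≤ xmax ∧ ymin ≤ p.2 ∧ p.2 ≤ ymax)))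
  decide ((inside.length : Int) = area)

-- ===== PRECONDITION & SPEC =====
def Spec_rectangle_is_valid (p1 : Int × Int) (p2 : Int × Int) (filled : List (Int × Int)) (out : Bool) : Prop := out = rectangle_is_valid_alt p1 p2 filled
instance (p1 : Int × Int) (p2 : Int × Int) (filled : List (Int × Int)) (out : Bool) : Decidable (Spec_rectangle_is_valid p1 p2 filled out) := by unfold Spec_rectangle_is_valid; infer_instance

-- ===== CLAIM (what is proved, stated in full; the proofs are below) =====
def Claim_equal_rectangle_is_valid : Prop := ∀ (p1 : Int × Int) (p2 : Int × Int) (filled : List (Int × Int)), Dom_rectangle_is_valid p1 p2 filled → Spec_rectangle_is_valid p1 p2 filled (rectangle_is_valid p1 p2 filled)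

-- ===== LEMMAS AND PROOFS =====

theorem pvAInner_iff (x y ymax : Int) (filled : List (Int × Int)) :
    pvAInner x y ymax filled = true ↔ ∀ b : Int, y ≤ b → b ≤ ymax → (x, b) ∈ filled := by
  fun_induction pvAInner x y ymax filled with
  | case1 y hle hmem ih =>
    rw [ih]
    constructor
    · intro h b hb1 hb2
      rcases eq_or_lt_of_le hb1 with h' | h'
      · exact h' ▸ hmem
      · exact h b (by omega) hb2
    · intro h b hb1 hb2
      exact h b (by omega) hb2
  | case2 y hle hmem =>
    simp only [Bool.false_eq_true, false_iff]
    intro h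
    exact hmem (h y le_rfl hle)
  | case3 y hle =>
    simp only [true_iff]
    intro b hb1 hb2
    omega

theorem pvAOuter_iff (x xmax ymin ymax : Int) (filled : List (Int × Int)) :
    pvAOuter x xmax ymin ymax filled = true ↔
      ∀ a : Int, x ≤ a → a ≤ xmax → ∀ b : Int, ymin ≤ b → b ≤ ymax → (a, b) ∈ filled := by
  fun_induction pvAOuter x xmax ymin ymax filled with
  | case1 x hle hin ih =>
    rw [ih]
    constructor
    · intro h a ha1 ha2 b hb1 hb2
      rcases eq_or_lt_of_le ha1 with h' | h'
      · exact h' ▸ (pvAInner_iff x ymin ymax filled).1 hin b hb1 hb2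
      · exact h a (by omega) ha2 b hb1 hb2
    · intro h a ha1 ha2 b hb1 hb2
      exact h a (by omega) ha2 b hb1 hb2
  | case2 x hle hin =>
    simp only [Bool.false_eq_true, false_iff]
    intro h
    exact hin ((pvAInner_iff x ymin ymax filled).2 (h x le_rfl hle))
  | case3 x hle =>
    simp only [true_iff]
    intro a ha1 ha2
    omega

-- the rectangle, as a finset (proof-side helper only)
noncomputable def pvRect (xmin xmax ymin ymax : Int) : Finset (Int × Int) :=
  Finset.Icc xmin xmax ×ˢ Finset.Icc ymin ymax

theorem pvA_iff (xmin xmax ymin ymax : Int) (filled : List (Int × Int)) :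
    pvAOuter xmin xmax ymin ymax filled = true ↔
      ∀ p ∈ pvRect xmin xmax ymin ymax, p ∈ filled := by
  rw [pvAOuter_iff]
  simp only [pvRect, Finset.mem_product, Finset.mem_Icc, Prod.forall]
  constructor
  · rintro h a b ⟨⟨h1, h2⟩, h3, h4⟩
    exact h a h1 h2 b h3 h4
  · intro h a h1 h2 b h3 h4
    exact h a b ⟨⟨h1, h2⟩, h3, h4⟩

theorem pvB_iff (xmin xmax ymin ymax : Int) (filled : List (Int × Int))
    (hx : xmin ≤ xmax) (hy : ymin ≤ ymax) :
    (((PySem.Set.ofList (filled.filter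
        (fun p => decide (xmin ≤ p.1 ∧ p.1 ≤ xmax ∧ ymin ≤ p.2 ∧ p.2 ≤ ymax)))).length : Int)
        = (xmax - xmin + 1) * (ymax - ymin + 1)) ↔
      ∀ p ∈ pvRect xmin xmax ymin ymax, p ∈ filled := by
  set S := PySem.Set.ofList (filled.filter
      (fun p => decide (xmin ≤ p.1 ∧ p.1 ≤ xmax ∧ ymin ≤ p.2 ∧ p.2 ≤ ymax))) with hS
  have hnd : S.Nodup := PySem.Set.nodup_ofList _
  have hmem : ∀ p : Int × Int, p ∈ S ↔ p ∈ filled ∧ p ∈ pvRect xmin xmax ymin ymax := by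
    intro p
    simp [hS, PySem.Set.mem_ofList, List.mem_filter, pvRect, Finset.mem_product, Finset.mem_Icc,
      and_assoc]
  have hsub : S.toFinset ⊆ pvRect xmin xmax ymin ymax := by
    intro p hp
    exact ((hmem p).1 (List.mem_toFinset.1 hp)).2
  have hcardS : S.toFinset.card = S.length := List.toFinset_card_of_nodup hnd
  have h1 : ((xmax + 1 - xmin).toNat : Int) = xmax + 1 - xmin := Int.toNat_of_nonneg (by omega)
  have h2 : ((ymax + 1 - ymin).toNat : Int) = ymax + 1 - ymin := Int.toNat_of_nonneg (by omega)
  have hcardR : ((pvRect xmin xmax ymin ymax).card : Int) = (xmax - xmin + 1) * (ymax - ymin + 1) := by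
    rw [pvRect, Finset.card_product, Int.card_Icc, Int.card_Icc, Nat.cast_mul, h1, h2]
    ring
  constructor
  · intro h p hp
    have hcard : (pvRect xmin xmax ymin ymax).card ≤ S.toFinset.card := by
      have : (S.toFinset.card : Int) = ((pvRect xmin xmax ymin ymax).card : Int) := by
        rw [hcardS, hcardR]; exact_mod_cast h
      omega
    have heq := Finset.eq_of_subset_of_card_le hsub hcard
    have : p ∈ S.toFinset := heq ▸ hp
    exact ((hmem p).1 (List.mem_toFinset.1 this)).1
  · intro h
    have heq : S.toFinset = pvRect xmin xmax ymin ymax := by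
      apply Finset.Subset.antisymm hsub
      intro p hp
      exact List.mem_toFinset.2 ((hmem p).2 ⟨h p hp, hp⟩)
    rw [← hcardR, ← heq, hcardS]

-- ===== VERDICT (by name: the statement is the Claim_ definition above) =====
theorem rectangle_is_valid_spec : Claim_equal_rectangle_is_valid := by
  intro p1 p2 filled _
  unfold Spec_rectangle_is_valid rectangle_is_valid rectangle_is_valid_alt
  simp only [← min_def, ← max_def]
  rw [Bool.eq_iff_iff, pvA_iff, decide_eq_true_eq]
  exact (pvB_iff _ _ _ _ filled min_le_max min_le_max).symm
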